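-- pv_equiv track=rewrite | github.com/ajcarrillo/pago-de-derechos | app/solicitud_pago/algoritmos.py | suma_producto_ponderados
-- ===== SOURCE A (Python) =====
-- from collections import deque
--
-- def suma_producto_ponderados(digitos, ponderados):
--     ponderados_queue = deque(ponderados)
--     suma = 0  # primero se utiliza para la suma de la multiplicación con los ponderados
--     for digito in digitos[::-1]:  # monto[::-1] -> monto en reversa
--         digito = int(digito)
--         if len(ponderados_queue) == 0:
--             ponderados_queue = deque(ponderados)
--         suma += (digito * ponderados_queue.popleft())
--     return suma
-- ===== SOURCE B (Python) =====
-- def suma_producto_ponderados(digitos, ponderados):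
--     n = len(ponderados)
--     return sum(int(d) * ponderados[i % n] for i, d in enumerate(reversed(digitos)))
-- ===== Notes on version B (the rewrite author's own statement) =====
-- stated objective: idiomatic
-- what changed: Replaces the mutable deque with refill-when-empty branch by a stateless one-liner: sum over enumerate(reversed(digitos)) indexing the weights with i % len(ponderados).
import Mathlib
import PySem

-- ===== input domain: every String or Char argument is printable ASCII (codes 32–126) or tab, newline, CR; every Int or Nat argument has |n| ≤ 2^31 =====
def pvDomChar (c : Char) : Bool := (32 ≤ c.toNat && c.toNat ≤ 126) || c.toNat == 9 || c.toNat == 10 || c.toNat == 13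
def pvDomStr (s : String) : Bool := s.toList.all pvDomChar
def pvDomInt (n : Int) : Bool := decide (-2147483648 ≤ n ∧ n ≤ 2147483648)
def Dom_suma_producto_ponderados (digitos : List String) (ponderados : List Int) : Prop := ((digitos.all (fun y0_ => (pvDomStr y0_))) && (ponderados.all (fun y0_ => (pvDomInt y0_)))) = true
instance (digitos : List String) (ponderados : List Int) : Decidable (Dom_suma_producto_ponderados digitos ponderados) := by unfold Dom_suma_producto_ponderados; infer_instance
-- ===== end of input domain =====

-- B replaces A's mutable deque with refill-on-empty by a stateless sum over
-- enumerate(reversed(digitos)) using ponderados[i % len(ponderados)] (objective: idiomatic).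

-- ===== PORT A =====
-- deque(ponderados) is the queue; popleft = take head, keep tail. int(d) → ofStr? (Pre_ guarantees some).
def suma_producto_ponderados (digitos : List String) (ponderados : List Int) : Int :=
  ((PySem.List.slice? digitos none none (-1)).getD [] |>.foldl
    (fun (st : List Int × Int) digito =>
      let d := (PySem.Int.ofStr? digito).getD 0
      let q := if st.1.length = 0 then ponderados else st.1
      (q.drop 1, st.2 + d * (PySem.List.pyGet? q 0).getD 0))
    (ponderados, 0)).2

-- ===== PORT B =====
-- sum(int(d) * ponderados[i % n] for i, d in enumerate(reversed(digitos))); % via mod? (none ↔ n = 0, excluded by Pre_).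
def suma_producto_ponderados_alt (digitos : List String) (ponderados : List Int) : Int :=
  let n : Int := ponderados.length
  (PySem.List.enumerate digitos.reverse 0).foldl
    (fun s p =>
      s + (PySem.Int.ofStr? p.2).getD 0 *
          (PySem.List.pyGet? ponderados ((PySem.Int.mod? p.1 n).getD 0)).getD 0) 0

-- ===== PRECONDITION & SPEC =====
-- Pre_ excludes exactly the inputs where Python A raises: a digit string int() rejects
-- (ValueError) or a nonempty digitos with empty ponderados (IndexError on popleft).
def Pre_suma_producto_ponderados (digitos : List String) (ponderados : List Int) : Prop :=
  (∀ d ∈ digitos, (PySem.Int.ofStr? d).isSome) ∧ (digitos = [] ∨ ponderados ≠ [])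
instance (digitos : List String) (ponderados : List Int) : Decidable (Pre_suma_producto_ponderados digitos ponderados) := by unfold Pre_suma_producto_ponderados; infer_instance
def pvWitness_suma_producto_ponderados : List String × List Int := (["12", "3", "4"], [2, 5])

def Spec_suma_producto_ponderados (digitos : List String) (ponderados : List Int) (out : Int) : Prop := out = suma_producto_ponderados_alt digitos ponderados
instance (digitos : List String) (ponderados : List Int) (out : Int) : Decidable (Spec_suma_producto_ponderados digitos ponderados out) := by unfold Spec_suma_producto_ponderados; infer_instance

-- ===== CLAIM (what is proved, stated in full; the proofs are below) =====
def Claim_equal_suma_producto_ponderados : Prop := ∀ (digitos : List String) (ponderados : List Int), Dom_suma_producto_ponderados digitos ponderados → Pre_suma_producto_ponderados digitos ponderados → Spec_suma_producto_ponderados digitos ponderados (suma_producto_ponderados digitos ponderados)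

-- ===== LEMMAS AND PROOFS =====

-- Index-based weighted sum both ports are reduced to.
def pvWsum (ponderados : List Int) (l : List String) (i : Nat) : Int :=
  match l with
  | [] => 0
  | d :: t =>
      (PySem.Int.ofStr? d).getD 0 * ponderados.getD (i % ponderados.length) 0
        + pvWsum ponderados t (i + 1)

theorem pvA_fold (ponderados : List Int) (l : List String) (j i : Nat) (s : Int)
    (hn : 0 < ponderados.length) (hj : j ≤ ponderados.length)
    (hmod : j % ponderados.length = i % ponderados.length) :
    (l.foldl
      (fun (st : List Int × Int) digito =>
        let d := (PySem.Int.ofStr? digito).getD 0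
        let q := if st.1.length = 0 then ponderados else st.1
        (q.drop 1, st.2 + d * (PySem.List.pyGet? q 0).getD 0))
      (ponderados.drop j, s)).2 = s + pvWsum ponderados l i := by
  induction l generalizing j i s with
  | nil => simp [pvWsum]
  | cons d t ih =>
    simp only [List.foldl_cons, pvWsum]
    by_cases hje : j = ponderados.length
    · have hq : ponderados.drop j = [] := by simp [hje]
      have hi0 : i % ponderados.length = 0 := by
        rw [← hmod, hje, Nat.mod_self]
      have h1 : (1 : Nat) % ponderados.length = (i + 1) % ponderados.length := by
        conv_rhs => rw [Nat.add_mod, hi0, Nat.zero_add, Nat.mod_mod_of_dvd _ (dvd_refl _)]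
      rw [hq]
      simp only [List.length_nil, if_true]
      rw [ih 1 (i + 1) _ hn h1, hi0, PySem.List.pyGet?_zero]
      have : (ponderados[0]?).getD 0 = ponderados.getD 0 0 := rfl
      rw [this]; ring
    · have hjlt : j < ponderados.length := lt_of_le_of_ne hj hje
      have hij : i % ponderados.length = j := by
        rw [← hmod, Nat.mod_eq_of_lt hjlt]
      have hq : (ponderados.drop j).length ≠ 0 := by
        simp [List.length_drop]; omega
      simp only [if_neg hq]
      have hdd : (ponderados.drop j).drop 1 = ponderados.drop (j + 1) := by
        rw [List.drop_drop]
      have hmod' : (j + 1) % ponderados.length = (i + 1) % ponderados.length := by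
        rw [Nat.add_mod, Nat.add_mod i, hmod]
      rw [hdd, ih (j + 1) (i + 1) _ hjlt hmod', hij, PySem.List.pyGet?_zero]
      have hg : ((ponderados.drop j)[0]?).getD 0 = ponderados.getD j 0 := by
        rw [List.getElem?_drop]; rfl
      rw [hg]; ring

theorem pvB_fold (ponderados : List Int) (l : List String) (i : Nat) (s : Int)
    (hn : 0 < ponderados.length) :
    ((PySem.List.enumerate l (i : Int)).foldl
      (fun s p =>
        s + (PySem.Int.ofStr? p.2).getD 0 *
            (PySem.List.pyGet? ponderados
              ((PySem.Int.mod? p.1 (ponderados.length : Int)).getD 0)).getD 0) s)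
      = s + pvWsum ponderados l i := by
  induction l generalizing i s with
  | nil => simp [PySem.List.enumerate_nil, pvWsum]
  | cons d t ih =>
    rw [PySem.List.enumerate_cons, List.foldl_cons]
    have hcast : ((i : Int) + 1) = ((i + 1 : Nat) : Int) := by push_cast; ring
    rw [hcast, ih (i + 1) _]
    simp only [pvWsum]
    have hne : (ponderados.length : Int) ≠ 0 := by exact_mod_cast hn.ne'
    simp only [PySem.Int.mod?, if_neg hne, Option.getD_some]
    have hfm : ((i : Int).fmod (ponderados.length : Int))
        = ((i % ponderados.length : Nat) : Int) := by
      rw [show ((i : Int).fmod (ponderados.length : Int))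
            = PySem.Int.mod (i : Int) (ponderados.length : Int) from rfl,
          PySem.Int.mod_natCast]
    rw [hfm, PySem.List.pyGet?_natCast]
    have : (ponderados[(i % ponderados.length)]?).getD 0
        = ponderados.getD (i % ponderados.length) 0 := rfl
    rw [this]; ring

-- ===== VERDICT (by name: the statement is the Claim_ definition above) =====
theorem suma_producto_ponderados_spec : Claim_equal_suma_producto_ponderados := by
  intro digitos ponderados _ hpre
  unfold Spec_suma_producto_ponderados suma_producto_ponderados suma_producto_ponderados_alt
  rw [PySem.List.slice?_none_none_neg_one]
  rcases hpre.2 with hd | hp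
  · subst hd; simp [PySem.List.enumerate_nil]
  · have hn : 0 < ponderados.length := List.length_pos_of_ne_nil hp
    have hA := pvA_fold ponderados digitos.reverse 0 0 0 hn (Nat.zero_le _) rfl
    simp only [List.drop_zero] at hA
    have hB := pvB_fold ponderados digitos.reverse 0 0 hn
    simp only [Nat.cast_zero] at hB
    simp only [Option.getD_some]
    rw [hA]
    exact hB.symm
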